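-- pv_equiv track=rewrite | github.com/meet-shah-technossus/Legacy_System_Code_Migration_System | backend/app/mapping/javascript_mapper.py | _pick_to_js_name
-- ===== SOURCE A (Python) =====
-- def _pick_to_js_name(raw: str) -> str:
--     """Convert PICK.BASIC.NAME → pickBasicName (camelCase)."""
--     parts = raw.replace("-", ".").split(".")
--     if not parts:
--         return raw.lower()
--     result = parts[0].lower()
--     for p in parts[1:]:
--         result += p.capitalize()
--     return result
-- ===== SOURCE B (Python) =====
-- def _pick_to_js_name(raw: str) -> str:
--     out = []
--     first_word = True
--     new_word = False
--     for ch in raw: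
--         if ch == '.' or ch == '-':
--             first_word = False
--             new_word = True
--         elif first_word:
--             out.append(ch.lower())
--         elif new_word:
--             out.append(ch.upper())
--             new_word = False
--         else:
--             out.append(ch.lower())
--     return ''.join(out)
-- ===== Notes on version B (the rewrite author's own statement) =====
-- stated objective: alternative
-- what changed: Replaced A's replace('-','.') + split('.') + capitalize-per-segment loop by a single left-to-right scan of the characters with first_word/new_word flags, never materializing a parts list.
import Mathlib
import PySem

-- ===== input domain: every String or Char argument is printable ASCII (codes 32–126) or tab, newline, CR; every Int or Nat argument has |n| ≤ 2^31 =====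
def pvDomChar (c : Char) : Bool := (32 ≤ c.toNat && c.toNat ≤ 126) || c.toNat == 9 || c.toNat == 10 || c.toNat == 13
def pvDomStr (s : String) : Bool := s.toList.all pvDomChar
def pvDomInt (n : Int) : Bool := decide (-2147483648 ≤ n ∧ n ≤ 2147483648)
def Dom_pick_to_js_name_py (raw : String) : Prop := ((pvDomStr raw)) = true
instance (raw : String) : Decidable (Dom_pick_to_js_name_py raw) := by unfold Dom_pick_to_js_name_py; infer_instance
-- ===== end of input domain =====

-- B replaces A's replace+split+loop by a single-pass scanner with first-word/new-word flags (objective: alternative decomposition; exact on the ASCII domain).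


-- ===== PORT A =====
-- port of Python's str.capitalize on a char list (exact on the ASCII domain)
def pyCapitalizeChars (s : List Char) : List Char :=
  match s with
  | [] => []
  | c :: t => PySem.Chars.upperChar c :: PySem.Chars.lower t

def pick_to_js_name_py (raw : String) : String :=
  let parts : List (List Char) :=
    PySem.Chars.splitOn (PySem.Str.replace raw "-" ".").toList ['.']
  match parts with
  | [] => PySem.Str.lower raw
  | p0 :: rest =>
      String.ofList (rest.foldl (fun result p => result ++ pyCapitalizeChars p) (PySem.Chars.lower p0))

-- ===== PORT B =====
-- one loop step of Source B's scanner: state = (out, first_word, new_word)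
def altStep (st : List Char × Bool × Bool) (ch : Char) : List Char × Bool × Bool :=
  if ch = '.' ∨ ch = '-' then (st.1, false, true)
  else if st.2.1 then (st.1 ++ [PySem.Chars.lowerChar ch], st.2.1, st.2.2)
  else if st.2.2 then (st.1 ++ [PySem.Chars.upperChar ch], false, false)
  else (st.1 ++ [PySem.Chars.lowerChar ch], st.2.1, st.2.2)

def pick_to_js_name_py_alt (raw : String) : String :=
  String.ofList (raw.toList.foldl altStep ([], true, false)).1

-- ===== PRECONDITION & SPEC =====
def Spec_pick_to_js_name_py (raw : String) (out : String) : Prop := out = pick_to_js_name_py_alt raw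
instance (raw : String) (out : String) : Decidable (Spec_pick_to_js_name_py raw out) := by unfold Spec_pick_to_js_name_py; infer_instance

-- ===== CLAIM (what is proved, stated in full; the proofs are below) =====
def Claim_equal_pick_to_js_name_py : Prop := ∀ (raw : String), Dom_pick_to_js_name_py raw → Spec_pick_to_js_name_py raw (pick_to_js_name_py raw)

-- ===== LEMMAS AND PROOFS =====

-- substitution performed by raw.replace("-", ".")
def pvSub (c : Char) : Char := if c = '-' then '.' else c

-- structural version of split-on-'.': (first segment, later segments)
def pvSplitDot : List Char → List Char × List (List Char)
  | [] => ([], [])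
  | c :: t =>
    let r := pvSplitDot t
    if c = '.' then ([], r.1 :: r.2) else (c :: r.1, r.2)

-- concatenation of the capitalized later segments
def pvCaps (rs : List (List Char)) : List Char := (rs.map pyCapitalizeChars).flatten

theorem pv_replace_go (l : List Char) : ∀ (fuel : Nat) (acc : List Char), l.length ≤ fuel →
    PySem.Chars.replace.go ['-'] ['.'] fuel l acc = acc.reverse ++ l.map pvSub := by
  induction l with
  | nil =>
      intro fuel acc _
      cases fuel <;> simp [PySem.Chars.replace.go]
  | cons c t ih =>
      intro fuel acc h
      cases fuel with
      | zero => simp at h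
      | succ f =>
        rw [PySem.Chars.replace.go]
        by_cases hc : c = '-'
        · simp [hc, List.isPrefixOf, ih f ('.' :: acc) (by simpa using h), pvSub]
        · have hc' : ¬ ('-' = c) := fun hx => hc hx.symm
          simp [List.isPrefixOf, hc', ih f (c :: acc) (by simpa using h), pvSub, hc]

theorem pv_replace_eq (raw : String) :
    (PySem.Str.replace raw "-" ".").toList = raw.toList.map pvSub := by
  simp [PySem.Str.replace, PySem.Chars.replace]
  rw [pv_replace_go raw.toList raw.length [] (by simp)]
  simp

theorem pv_splitOn_go (l : List Char) : ∀ (fuel : Nat) (cur : List Char) (acc : List (List Char)),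
    l.length ≤ fuel →
    PySem.Chars.splitOn.go ['.'] fuel l cur acc
      = acc.reverse ++ (cur.reverse ++ (pvSplitDot l).1) :: (pvSplitDot l).2 := by
  induction l with
  | nil =>
      intro fuel cur acc _
      cases fuel <;> simp [PySem.Chars.splitOn.go, pvSplitDot]
  | cons c t ih =>
      intro fuel cur acc h
      cases fuel with
      | zero => simp at h
      | succ f =>
        rw [PySem.Chars.splitOn.go]
        have ht : t.length ≤ f := by simpa using h
        by_cases hc : c = '.'
        · simp [hc, List.isPrefixOf, ih f [] (cur.reverse :: acc) ht, pvSplitDot]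
        · have hc' : ¬ ('.' = c) := fun hx => hc hx.symm
          simp [List.isPrefixOf, hc', ih f (c :: cur) acc ht, pvSplitDot, hc]

theorem pv_splitOn_eq (l : List Char) :
    PySem.Chars.splitOn l ['.'] = (pvSplitDot l).1 :: (pvSplitDot l).2 := by
  rw [PySem.Chars.splitOn, pv_splitOn_go _ _ _ _ (by omega)]
  simp

theorem pv_foldl_cap (rest : List (List Char)) : ∀ (x : List Char),
    rest.foldl (fun result p => result ++ pyCapitalizeChars p) x = x ++ pvCaps rest := by
  induction rest with
  | nil => intro x; simp [pvCaps]
  | cons p rs ih => intro x; simp [List.foldl, ih, pvCaps]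

-- the scanner from each of its three reachable states computes the split-based value
theorem pv_scan3 (l : List Char) :
    (∀ out nw, (l.foldl altStep (out, true, nw)).1
        = out ++ PySem.Chars.lower (pvSplitDot (l.map pvSub)).1 ++ pvCaps (pvSplitDot (l.map pvSub)).2)
  ∧ (∀ out, (l.foldl altStep (out, false, true)).1
        = out ++ pvCaps ((pvSplitDot (l.map pvSub)).1 :: (pvSplitDot (l.map pvSub)).2))
  ∧ (∀ out, (l.foldl altStep (out, false, false)).1
        = out ++ PySem.Chars.lower (pvSplitDot (l.map pvSub)).1 ++ pvCaps (pvSplitDot (l.map pvSub)).2) := by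
  induction l with
  | nil => simp [pvSplitDot, pvCaps, PySem.Chars.lower, pyCapitalizeChars]
  | cons c t ih =>
    obtain ⟨ihF, ihG, ihH⟩ := ih
    by_cases hd : c = '.' ∨ c = '-'
    · have hsub : pvSub c = '.' := by rcases hd with h | h <;> simp [pvSub, h]
      refine ⟨?_, ?_, ?_⟩ <;> intros <;>
        simp [List.foldl, altStep, hd, hsub, pvSplitDot, ihG, pvCaps, pyCapitalizeChars,
          PySem.Chars.lower]
    · push Not at hd
      have hsub : pvSub c = c := by simp [pvSub, hd.2]
      refine ⟨?_, ?_, ?_⟩ <;> intros <;>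
        simp [List.foldl, altStep, hd.1, hd.2, hsub, pvSplitDot, ihF, ihH, pvCaps,
          pyCapitalizeChars, PySem.Chars.lower]

-- ===== VERDICT (by name: the statement is the Claim_ definition above) =====
theorem pick_to_js_name_py_spec : Claim_equal_pick_to_js_name_py := by
  intro raw _
  unfold Spec_pick_to_js_name_py pick_to_js_name_py pick_to_js_name_py_alt
  rw [pv_replace_eq, pv_splitOn_eq]
  simp only []
  rw [pv_foldl_cap, (pv_scan3 raw.toList).1]
  simp
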